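-- pv_equiv track=rewrite | github.com/shaikkhaleedaazhari/Dev_ops | forpython/ass1.py | finsmal
-- ===== SOURCE A (Python) =====
-- def finsmal(arr,n):      #10, 5, 20, 8, 15, 18
--     for _ in range(n):
--         small = None
--         for i in arr:
--             if small is None or i <small:
--                 small =i
--         new_arr=[] #10, 5, 20,8,15,18
--         for x in arr:
--             if x!= small:
--                 new_arr.append(x)#10, 20, 8, 15, 18
--         arr=new_arr
--     return small
-- ===== SOURCE B (Python) =====
-- def finsmal(arr, n):
--     distinct = sorted(set(arr))
--     if n - 1 < len(distinct):
--         return distinct[n - 1]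
--     return None
-- ===== Notes on version B (the rewrite author's own statement) =====
-- stated objective: faster
-- what changed: Replaces A's n rounds of linear min-scan plus list rebuild with a single sort of the distinct values followed by one index lookup.
import Mathlib
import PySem

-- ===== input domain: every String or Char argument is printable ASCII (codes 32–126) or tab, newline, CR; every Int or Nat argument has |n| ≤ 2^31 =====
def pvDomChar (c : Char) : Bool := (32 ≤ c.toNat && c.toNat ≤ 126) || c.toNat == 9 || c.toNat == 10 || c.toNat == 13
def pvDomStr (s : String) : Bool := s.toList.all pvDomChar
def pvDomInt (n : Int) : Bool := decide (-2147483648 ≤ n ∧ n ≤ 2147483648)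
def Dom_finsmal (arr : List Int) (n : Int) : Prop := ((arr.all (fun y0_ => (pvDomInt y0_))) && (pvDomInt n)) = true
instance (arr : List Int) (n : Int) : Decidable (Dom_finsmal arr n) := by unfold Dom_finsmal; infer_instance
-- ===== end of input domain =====

-- B replaces A's repeated min-scan-and-rebuild with sorted(set(arr)) and one index lookup (faster, asymptotically).

-- ===== PORT A =====
-- inner loop 'for i in arr: if small is None or i < small: small = i'
def pvMinStep (s : Option Int) (i : Int) : Option Int :=
  match s with
  | none => some i
  | some s' => if i < s' then some i else some s'

-- 'for _ in range(n)' as structural recursion on the remaining count; state = (arr, small)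
def finsmalLoop : Nat → List Int → Option Int → Option Int
  | 0, _, small => small
  | k+1, arr, _ =>
    let small := arr.foldl pvMinStep none
    let newArr := arr.foldl (fun acc x => if some x ≠ small then acc ++ [x] else acc) ([] : List Int)
    finsmalLoop k newArr small

def finsmal (arr : List Int) (n : Int) : Option Int :=
  finsmalLoop n.toNat arr none   -- initial 'none' = unassigned 'small'; reached only for n ≤ 0 (excluded by Pre_)

-- ===== PORT B =====
def finsmal_alt (arr : List Int) (n : Int) : Option Int :=
  let distinct := PySem.List.sorted (PySem.Set.ofList arr) (fun x => x) false
  if n - 1 < (distinct.length : Int) then PySem.List.pyGet? distinct (n - 1) else none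

-- ===== PRECONDITION & SPEC =====
-- Pre_ excludes n ≤ 0, on which the Python A raises UnboundLocalError ('small' is never assigned).
def Pre_finsmal (arr : List Int) (n : Int) : Prop := 1 ≤ n
instance (arr : List Int) (n : Int) : Decidable (Pre_finsmal arr n) := by unfold Pre_finsmal; infer_instance

def pvWitness_finsmal : List Int × Int := ([10, 5, 20, 8, 15, 18], 3)

def Spec_finsmal (arr : List Int) (n : Int) (out : Option Int) : Prop := out = finsmal_alt arr n
instance (arr : List Int) (n : Int) (out : Option Int) : Decidable (Spec_finsmal arr n out) := by unfold Spec_finsmal; infer_instance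

-- ===== CLAIM (what is proved, stated in full; the proofs are below) =====
def Claim_equal_finsmal : Prop := ∀ (arr : List Int) (n : Int), Dom_finsmal arr n → Pre_finsmal arr n → Spec_finsmal arr n (finsmal arr n)

-- ===== LEMMAS AND PROOFS =====

-- sorted distinct values of arr
def pvD (arr : List Int) : List Int := PySem.List.sorted (PySem.Set.ofList arr) (fun x => x) false

lemma minFold_isSome (l : List Int) (a : Int) : (l.foldl pvMinStep (some a)).isSome := by
  induction l generalizing a with
  | nil => rfl
  | cons x xs ih => simp only [List.foldl, pvMinStep]; split <;> exact ih _

lemma minFold_spec (l : List Int) (a m : Int)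
    (h : l.foldl pvMinStep (some a) = some m) :
    (m = a ∨ m ∈ l) ∧ m ≤ a ∧ ∀ y ∈ l, m ≤ y := by
  induction l generalizing a with
  | nil => simp at h; subst h; simp
  | cons x xs ih =>
    simp only [List.foldl, pvMinStep] at h
    split at h
    · obtain ⟨h1, h2, h3⟩ := ih _ h
      refine ⟨?_, by omega, ?_⟩
      · rcases h1 with h1 | h1
        · exact Or.inr (by simp [h1])
        · exact Or.inr (List.mem_cons_of_mem _ h1)
      · intro y hy
        rcases List.mem_cons.mp hy with rfl | hy
        · exact h2
        · exact h3 y hy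
    · obtain ⟨h1, h2, h3⟩ := ih _ h
      refine ⟨?_, h2, ?_⟩
      · rcases h1 with h1 | h1
        · exact Or.inl h1
        · exact Or.inr (List.mem_cons_of_mem _ h1)
      · intro y hy
        rcases List.mem_cons.mp hy with rfl | hy
        · omega
        · exact h3 y hy

lemma minFold_mem_le (l : List Int) (m : Int) (h : l.foldl pvMinStep none = some m) :
    m ∈ l ∧ ∀ y ∈ l, m ≤ y := by
  cases l with
  | nil => simp at h
  | cons x xs =>
    simp only [List.foldl, pvMinStep] at h
    obtain ⟨h1, h2, h3⟩ := minFold_spec xs x m h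
    refine ⟨?_, ?_⟩
    · rcases h1 with rfl | h1
      · exact List.mem_cons_self
      · exact List.mem_cons_of_mem _ h1
    · intro y hy
      rcases List.mem_cons.mp hy with rfl | hy
      · exact h2
      · exact h3 y hy

lemma pvD_head (arr : List Int) (m : Int) (h : arr.foldl pvMinStep none = some m) :
    ∃ t, pvD arr = m :: t := by
  obtain ⟨hm, hmin⟩ := minFold_mem_le arr m h
  have hne : pvD arr ≠ [] := by
    intro hnil
    have harr : arr = [] := by
      have := (PySem.List.sorted_eq_nil_iff (PySem.Set.ofList arr) (fun x => x) false).mp hnil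
      have hmem := (PySem.Set.mem_ofList arr m).mpr hm
      rw [this] at hmem
      simp at hmem
    subst harr; simp at hm
  obtain ⟨h0, t, ht⟩ := List.exists_cons_of_ne_nil hne
  have hle : ∀ y ∈ PySem.Set.ofList arr, h0 ≤ y :=
    PySem.List.key_head_sorted_le (PySem.Set.ofList arr) (fun x => x) ht
  have h0m : h0 ≤ m := hle m ((PySem.Set.mem_ofList arr m).mpr hm)
  have h0mem : h0 ∈ arr := by
    have hd : h0 ∈ pvD arr := by rw [ht]; exact List.mem_cons_self
    rw [pvD, PySem.List.mem_sorted, PySem.Set.mem_ofList] at hd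
    exact hd
  have hm0 : m ≤ h0 := hmin h0 h0mem
  exact ⟨t, by rw [ht]; congr 1; omega⟩

lemma pvD_filter (arr : List Int) (m : Int) (t : List Int) (ht : pvD arr = m :: t) :
    pvD (arr.filter (fun x => decide ¬(some x = some m))) = t := by
  have hpw : (m :: t).Pairwise (· < ·) := ht ▸ PySem.List.sorted_ofList_pairwise_lt arr
  have htlt : ∀ y ∈ t, m < y := (List.pairwise_cons.mp hpw).1
  have htpw : t.Pairwise (· < ·) := (List.pairwise_cons.mp hpw).2
  apply PySem.List.sorted_eq_of_perm_of_pairwise_lt _ _ _ ?_ htpw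
  apply (List.perm_ext_iff_of_nodup (htpw.imp ne_of_lt) (PySem.Set.nodup_ofList _)).mpr
  intro x
  rw [PySem.Set.mem_ofList, List.mem_filter]
  simp only [decide_not, Bool.not_eq_eq_eq_not, Bool.not_true, decide_eq_false_iff_not,
    Option.some.injEq]
  constructor
  · intro hx
    have hxd : x ∈ pvD arr := by rw [ht]; exact List.mem_cons_of_mem _ hx
    rw [pvD, PySem.List.mem_sorted, PySem.Set.mem_ofList] at hxd
    exact ⟨hxd, by have := htlt x hx; omega⟩
  · rintro ⟨hxa, hxm⟩
    have hxd : x ∈ pvD arr := by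
      rw [pvD, PySem.List.mem_sorted, PySem.Set.mem_ofList]; exact hxa
    rw [ht] at hxd
    rcases List.mem_cons.mp hxd with rfl | hx
    · exact absurd rfl hxm
    · exact hx

lemma newArr_eq_filter (arr : List Int) (m : Int) :
    arr.foldl (fun acc x => if some x ≠ some m then acc ++ [x] else acc) ([] : List Int)
      = arr.filter (fun x => decide ¬(some x = some m)) := by
  have h := PySem.List.foldl_append_if (p := fun x => decide ¬(some x = some m)) (f := id)
    (l := arr) (acc := ([] : List Int))
  simpa using h

lemma loop_eq (k : Nat) : ∀ (arr : List Int) (s : Option Int),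
    finsmalLoop (k+1) arr s = (pvD arr)[k]? := by
  induction k with
  | zero =>
    intro arr s
    have step : finsmalLoop 1 arr s = arr.foldl pvMinStep none := rfl
    rw [step]
    cases h : arr.foldl pvMinStep none with
    | none =>
      cases arr with
      | nil => rfl
      | cons x xs =>
        exfalso
        have hs := minFold_isSome xs x
        simp only [List.foldl, pvMinStep] at h
        rw [h] at hs; simp at hs
    | some m =>
      obtain ⟨t, ht⟩ := pvD_head arr m h
      rw [ht]; rfl
  | succ k ih =>
    intro arr s
    have step : finsmalLoop (k+1+1) arr s
        = finsmalLoop (k+1)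
            (arr.foldl (fun acc x => if some x ≠ (arr.foldl pvMinStep none) then acc ++ [x] else acc) [])
            (arr.foldl pvMinStep none) := rfl
    rw [step, ih]
    cases h : arr.foldl pvMinStep none with
    | none =>
      cases arr with
      | nil => rfl
      | cons x xs =>
        exfalso
        have hs := minFold_isSome xs x
        simp only [List.foldl, pvMinStep] at h
        rw [h] at hs; simp at hs
    | some m =>
      rw [newArr_eq_filter]
      obtain ⟨t, ht⟩ := pvD_head arr m h
      rw [pvD_filter arr m t ht, ht]
      rfl

-- ===== VERDICT (by name: the statement is the Claim_ definition above) =====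
theorem finsmal_spec : Claim_equal_finsmal := by
  intro arr n _ hpre
  have hn : (1:Int) ≤ n := hpre
  show finsmal arr n = finsmal_alt arr n
  have hk : n.toNat = (n.toNat - 1) + 1 := by omega
  rw [finsmal, hk, loop_eq]
  show (pvD arr)[n.toNat - 1]? = finsmal_alt arr n
  rw [finsmal_alt]
  by_cases hlt : n - 1 < ((PySem.List.sorted (PySem.Set.ofList arr) (fun x => x) false).length : Int)
  · rw [if_pos hlt, PySem.List.pyGet?_of_nonneg _ (show (0:Int) ≤ n - 1 by omega)]
    have he : (n - 1).toNat = n.toNat - 1 := by omega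
    rw [he]; rfl
  · rw [if_neg hlt]
    have hlen : (pvD arr).length ≤ n.toNat - 1 := by
      rw [pvD]; omega
    rw [List.getElem?_eq_none hlen]
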